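-- pv_equiv track=rewrite | github.com/lukevladthagi/Projeto-Pronto | controle_agenda/views.py | consolidar_por_paciente
-- ===== SOURCE A (Python) =====
-- def consolidar_por_paciente(agendamentos):
--     consolidado_por_paciente = {}
--     cnt_pacientes = 0
--     cnt_pacientes_total = 0
--
--     for agendamento in agendamentos:
--         nm_paciente = agendamento["nm_paciente"]  # Obtém o nome do paciente
--
--         # Verifica se o nome do paciente já está no dicionário
--         if nm_paciente in consolidado_por_paciente:
--             consolidado_por_paciente[nm_paciente].append(agendamento)  # Adiciona o agendamento à lista existente
--         else:
--             consolidado_por_paciente[nm_paciente] = [agendamento]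
--             cnt_pacientes_total += 1
--
--     # Retorna uma tupla com cnt_pacientes e consolidado_por_paciente
--     return cnt_pacientes, consolidado_por_paciente
-- ===== SOURCE B (Python) =====
-- def consolidar_por_paciente(agendamentos):
--     nomes = dict.fromkeys(ag["nm_paciente"] for ag in agendamentos)
--     return 0, {nome: [ag for ag in agendamentos if ag["nm_paciente"] == nome]
--                for nome in nomes}
-- ===== Notes on version B (the rewrite author's own statement) =====
-- stated objective: simpler
-- what changed: Replaces the incremental dict-building loop (membership test + append/create per appointment, plus dead counters) with an ordered dedup of the patient names followed by a per-name filter comprehension.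
import Mathlib
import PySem

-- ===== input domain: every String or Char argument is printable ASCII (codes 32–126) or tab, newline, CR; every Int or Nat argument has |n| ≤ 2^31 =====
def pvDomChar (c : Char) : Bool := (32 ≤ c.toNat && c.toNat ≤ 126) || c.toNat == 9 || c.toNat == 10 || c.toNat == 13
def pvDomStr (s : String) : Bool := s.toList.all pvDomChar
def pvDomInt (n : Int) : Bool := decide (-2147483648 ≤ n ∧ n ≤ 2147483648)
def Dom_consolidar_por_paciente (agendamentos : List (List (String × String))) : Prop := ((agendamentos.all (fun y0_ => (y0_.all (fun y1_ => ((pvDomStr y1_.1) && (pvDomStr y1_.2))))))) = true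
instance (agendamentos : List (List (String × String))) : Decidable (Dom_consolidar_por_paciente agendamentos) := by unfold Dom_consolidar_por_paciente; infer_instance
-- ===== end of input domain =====

-- ===== PORT A =====
-- Groups appointments by patient name into a dict; returns (cnt_pacientes = 0, the dict's items).
-- The loop state carries the dead counter cnt_pacientes_total, as in the Python.
def consolidar_por_paciente (agendamentos : List (List (String × String))) : Int × (List (String × List (List (String × String)))) :=
  let st := agendamentos.foldl
    (fun (st : PySem.Dict String (List (List (String × String))) × Int) ag =>
      match (PySem.Dict.mk ag).get? "nm_paciente" with
      | none => st  -- KeyError in Python; excluded by Pre_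
      | some nm =>
        if (st.1.contains nm) then
          (st.1.insert nm (st.1.getD nm [] ++ [ag]), st.2)
        else
          (st.1.insert nm [ag], st.2 + 1))
    (PySem.Dict.empty, (0 : Int))
  ((0 : Int), st.1.items)

-- ===== PORT B =====
-- patient name of one appointment; "" never occurs under Pre_ (the key is present)
def pvNome (ag : List (String × String)) : String := (PySem.Dict.mk ag).getD "nm_paciente" ""

def consolidar_por_paciente_alt (agendamentos : List (List (String × String))) : Int × (List (String × List (List (String × String)))) :=
  let nomes := PySem.List.dedup (agendamentos.map pvNome)
  ((0 : Int), nomes.map (fun nome => (nome, agendamentos.filter (fun ag => pvNome ag == nome))))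

-- ===== PRECONDITION & SPEC =====
-- Pre_ excludes (a) appointments lacking the key "nm_paciente", on which A raises KeyError, and
-- (b) inner association lists with duplicate keys, which do not represent Python dict values.
def Pre_consolidar_por_paciente (agendamentos : List (List (String × String))) : Prop :=
  ∀ ag ∈ agendamentos, (ag.map Prod.fst).Nodup ∧ "nm_paciente" ∈ ag.map Prod.fst
instance (agendamentos : List (List (String × String))) : Decidable (Pre_consolidar_por_paciente agendamentos) := by unfold Pre_consolidar_por_paciente; infer_instance
def pvWitness_consolidar_por_paciente : (List (List (String × String))) :=
  [[("nm_paciente", "Ana"), ("hora", "10")], [("nm_paciente", "Bruno")], [("nm_paciente", "Ana"), ("hora", "11")]]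

def Spec_consolidar_por_paciente (agendamentos : List (List (String × String))) (out : Int × (List (String × List (List (String × String))))) : Prop := out = consolidar_por_paciente_alt agendamentos
instance (agendamentos : List (List (String × String))) (out : Int × (List (String × List (List (String × String))))) : Decidable (Spec_consolidar_por_paciente agendamentos out) := by unfold Spec_consolidar_por_paciente; infer_instance

-- ===== CLAIM (what is proved, stated in full; the proofs are below) =====
def Claim_equal_consolidar_por_paciente : Prop := ∀ (agendamentos : List (List (String × String))), Dom_consolidar_por_paciente agendamentos → Pre_consolidar_por_paciente agendamentos → Spec_consolidar_por_paciente agendamentos (consolidar_por_paciente agendamentos)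

-- ===== LEMMAS AND PROOFS =====

-- A's loop step on the dict alone (the counter component stripped)
def pvStepD (d : PySem.Dict String (List (List (String × String)))) (ag : List (String × String)) :
    PySem.Dict String (List (List (String × String))) :=
  match (PySem.Dict.mk ag).get? "nm_paciente" with
  | none => d
  | some nm =>
    if d.contains nm then d.insert nm (d.getD nm [] ++ [ag]) else d.insert nm [ag]

-- the first component of A's paired fold ignores the counter
lemma pvFoldA_fst (xs : List (List (String × String)))
    (d : PySem.Dict String (List (List (String × String)))) (c : Int) :
    (xs.foldl
      (fun (st : PySem.Dict String (List (List (String × String))) × Int) ag =>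
        match (PySem.Dict.mk ag).get? "nm_paciente" with
        | none => st
        | some nm =>
          if (st.1.contains nm) then
            (st.1.insert nm (st.1.getD nm [] ++ [ag]), st.2)
          else
            (st.1.insert nm [ag], st.2 + 1))
      (d, c)).1 = xs.foldl pvStepD d := by
  induction xs generalizing d c with
  | nil => rfl
  | cons ag xs ih =>
    simp only [List.foldl_cons]
    cases h : (PySem.Dict.mk ag).get? "nm_paciente" with
    | none => simp [pvStepD, h, ih]
    | some nm =>
      by_cases hc : (d.contains nm) = true <;> simp [pvStepD, h, hc, ih]

-- when the key is present, looking it up yields exactly pvNome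
lemma pvGet_eq_some_nome (ag : List (String × String))
    (h : "nm_paciente" ∈ ag.map Prod.fst) :
    (PySem.Dict.mk ag).get? "nm_paciente" = some (pvNome ag) := by
  cases hg : (PySem.Dict.mk ag).get? "nm_paciente" with
  | none =>
    rw [PySem.Dict.get?_eq_none_iff_not_mem_keys] at hg
    simp only [PySem.Dict.keys_mk] at hg
    exact absurd h hg
  | some v =>
    simp [pvNome, PySem.Dict.getD_eq_get?_getD, hg]

-- on an appointment with the key present, A's branchy step is a dict modify
lemma pvStepD_eq_modify (d : PySem.Dict String (List (List (String × String))))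
    (ag : List (String × String)) (h : "nm_paciente" ∈ ag.map Prod.fst) :
    pvStepD d ag = d.modify (pvNome ag) [] (· ++ [ag]) := by
  rw [pvStepD, pvGet_eq_some_nome ag h]
  cases hg : d.get? (pvNome ag) with
  | none => simp [PySem.Dict.modify, PySem.Dict.getD_eq_get?_getD,
      PySem.Dict.contains_eq_isSome_get?, hg]
  | some v => simp [PySem.Dict.modify, PySem.Dict.getD_eq_get?_getD,
      PySem.Dict.contains_eq_isSome_get?, hg]

-- ===== VERDICT (by name: the statement is the Claim_ definition above) =====
theorem consolidar_por_paciente_spec : Claim_equal_consolidar_por_paciente := by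
  intro agendamentos _ hpre
  unfold Spec_consolidar_por_paciente consolidar_por_paciente consolidar_por_paciente_alt
  simp only [Prod.mk.injEq, true_and]
  rw [pvFoldA_fst]
  have hfold : agendamentos.foldl pvStepD PySem.Dict.empty
      = agendamentos.foldl (fun d ag => d.modify (pvNome ag) [] (· ++ [ag])) PySem.Dict.empty := by
    apply PySem.List.foldl_congr_mem
    intro d ag hag
    exact pvStepD_eq_modify d ag (hpre ag hag).2
  rw [hfold]
  have hmap : agendamentos.foldl (fun d ag => d.modify (pvNome ag) [] (· ++ [ag])) PySem.Dict.empty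
      = (agendamentos.map (fun ag => (pvNome ag, ag))).foldl
          (fun d p => d.modify p.1 [] (· ++ [p.2])) PySem.Dict.empty := by
    rw [List.foldl_map]
  have hnodup : ((agendamentos.map (fun ag => (pvNome ag, ag))).foldl
      (fun d p => d.modify p.1 [] (· ++ [p.2])) PySem.Dict.empty).keys.Nodup := by
    exact PySem.Dict.nodup_keys_foldl_modify_key _ Prod.fst _ _ _ (by simp)
  rw [hmap, PySem.Dict.items_eq_map_keys _ hnodup []]
  have hkeys : ((agendamentos.map (fun ag => (pvNome ag, ag))).foldl
      (fun d p => d.modify p.1 [] (· ++ [p.2])) PySem.Dict.empty).keys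
      = PySem.List.dedup (agendamentos.map pvNome) := by
    rw [PySem.Dict.keys_foldl_modify_key]
    simp [PySem.Set.update_nil_left, List.map_map, Function.comp_def]
  rw [hkeys]
  apply List.map_congr_left
  intro k hk
  congr 1
  rw [PySem.Dict.getD_foldl_modify_append]
  simp [PySem.Dict.getD_empty, List.filter_map, Function.comp_def]
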